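-- pv_equiv track=rewrite | github.com/DYShin1/algorithm | 프로그래머스/0/181874. A 강조하기/A 강조하기.py | solution
-- ===== SOURCE A (Python) =====
-- def solution(myString):
--     answer = ''
--     myString
--     for i in myString:
--         if i == 'a':
--             answer += i.upper()
--         elif i != 'A':
--             answer += i.lower()
--         else:
--             answer += i
--     return answer
-- ===== SOURCE B (Python) =====
-- def solution(myString):
--     return myString.lower().replace('a', 'A')
-- ===== Notes on version B (the rewrite author's own statement) =====
-- stated objective: idiomatic
-- what changed: Replaces the explicit per-character loop with its three-way branch by two whole-string library passes: lowercase the entire string, then substitute the uppercase form of the one emphasised letter.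
import Mathlib
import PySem

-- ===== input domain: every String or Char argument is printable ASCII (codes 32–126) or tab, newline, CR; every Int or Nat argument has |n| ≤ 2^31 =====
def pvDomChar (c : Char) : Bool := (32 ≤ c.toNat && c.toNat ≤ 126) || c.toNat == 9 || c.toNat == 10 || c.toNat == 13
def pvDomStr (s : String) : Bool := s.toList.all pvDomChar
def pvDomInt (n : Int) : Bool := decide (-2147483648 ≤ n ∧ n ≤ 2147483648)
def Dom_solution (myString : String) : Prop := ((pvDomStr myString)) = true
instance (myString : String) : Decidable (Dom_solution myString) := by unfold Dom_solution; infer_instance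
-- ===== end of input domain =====

-- B replaces A's per-character loop and branch by two whole-string passes: lower() then replace('a','A'); same result, idiomatic.


-- ===== PORT A =====
-- literal port: for each char, 'a' → i.upper(), else if ≠ 'A' → i.lower(), else keep; appended to the accumulator
def solution (myString : String) : String :=
  String.ofList (myString.toList.foldl (fun answer i =>
    if i = 'a' then answer ++ [PySem.Chars.upperChar i]
    else if i ≠ 'A' then answer ++ [PySem.Chars.lowerChar i]
    else answer ++ [i]) [])

-- ===== PORT B =====
-- literal port of Source B: myString.lower().replace('a', 'A')
def solution_alt (myString : String) : String :=
  PySem.Str.replace (PySem.Str.lower myString) "a" "A"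

-- ===== PRECONDITION & SPEC =====
def Spec_solution (myString : String) (out : String) : Prop := out = solution_alt myString
instance (myString : String) (out : String) : Decidable (Spec_solution myString out) := by unfold Spec_solution; infer_instance

-- ===== CLAIM (what is proved, stated in full; the proofs are below) =====
def Claim_equal_solution : Prop := ∀ (myString : String), Dom_solution myString → Spec_solution myString (solution myString)

-- ===== LEMMAS AND PROOFS =====

-- the per-character rule of A
def pvA (c : Char) : Char :=
  if c = 'a' then PySem.Chars.upperChar c
  else if c ≠ 'A' then PySem.Chars.lowerChar c
  else c

-- the effect of replace('a','A') on one character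
def pvRep (c : Char) : Char := if c = 'a' then 'A' else c

theorem pv_eq_iff_toNat (c d : Char) : c = d ↔ c.toNat = d.toNat := by
  constructor
  · intro h; rw [h]
  · intro h; exact Char.ext (UInt32.toNat_inj.mp h)

theorem pv_toNat_ofNat (n : Nat) (h : n.isValidChar) : (Char.ofNat n).toNat = n := by
  simp [Char.ofNat, h, Char.ofNatAux, Char.toNat]

theorem pv_lowerChar_ne_a (c : Char) (h1 : c ≠ 'a') (h2 : c ≠ 'A') :
    PySem.Chars.lowerChar c ≠ 'a' := by
  unfold PySem.Chars.lowerChar PySem.Chars.isupper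
  split_ifs with h
  · simp only [Bool.and_eq_true, decide_eq_true_eq, Char.le_def,
      UInt32.le_iff_toNat_le] at h
    intro he
    have hA : c.toNat ≤ 90 := h.2
    have hB : 65 ≤ c.toNat := h.1
    have hv : (c.toNat + 32).isValidChar := by left; omega
    have h97 := (pv_eq_iff_toNat _ _).mp he
    rw [pv_toNat_ofNat _ hv] at h97
    have e1 : ('a' : Char).toNat = 97 := rfl
    have e2 : ('A' : Char).val.toNat = 65 := rfl
    have e3 : ('Z' : Char).val.toNat = 90 := rfl
    have e4 : c.val.toNat = c.toNat := rfl
    have e5 : ('A' : Char).toNat = 65 := rfl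
    exact h2 ((pv_eq_iff_toNat c 'A').mpr (by omega))
  · exact h1

-- one-character replace: fRep applied pointwise
theorem pv_go_single (fuel : Nat) : ∀ (l acc : List Char), l.length ≤ fuel →
    PySem.Chars.replace.go ['a'] ['A'] fuel l acc = acc.reverse ++ l.map pvRep := by
  induction fuel with
  | zero =>
    intro l acc h
    cases l with
    | nil => simp [PySem.Chars.replace.go]
    | cons c t => simp at h
  | succ n ih =>
    intro l acc h
    cases l with
    | nil => simp [PySem.Chars.replace.go]
    | cons c t =>
      simp only [PySem.Chars.replace.go]
      by_cases hc : c = 'a'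
      · subst hc
        have hp : List.isPrefixOf ['a'] ('a' :: t) = true := by
          simp [List.isPrefixOf]
        simp only [hp, if_pos]
        rw [show List.drop ['a'].length ('a' :: t) = t from rfl,
            show (['A'].reverse ++ acc) = 'A' :: acc from rfl]
        rw [ih t _ (by simpa using Nat.le_of_succ_le_succ h)]
        simp [pvRep]
      · have hp : List.isPrefixOf ['a'] (c :: t) = false := by
          simp [List.isPrefixOf]; intro hh; exact absurd hh.symm hc
        simp only [hp]
        rw [ih t _ (by simpa using Nat.le_of_succ_le_succ h)]
        simp [pvRep, hc]

theorem pv_replace_single (cs : List Char) :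
    PySem.Chars.replace cs ['a'] ['A'] = cs.map pvRep := by
  unfold PySem.Chars.replace
  simp only [List.isEmpty_cons]
  exact pv_go_single cs.length cs [] (le_refl _)

theorem pv_pointwise (c : Char) : pvRep (PySem.Chars.lowerChar c) = pvA c := by
  by_cases h1 : c = 'a'
  · subst h1; decide
  · by_cases h2 : c = 'A'
    · subst h2; decide
    · have hne := pv_lowerChar_ne_a c h1 h2
      simp [pvRep, pvA, h1, h2, hne]

theorem pv_foldl_A (cs : List Char) : ∀ acc : List Char,
    cs.foldl (fun answer i =>
      if i = 'a' then answer ++ [PySem.Chars.upperChar i]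
      else if i ≠ 'A' then answer ++ [PySem.Chars.lowerChar i]
      else answer ++ [i]) acc = acc ++ cs.map pvA := by
  induction cs with
  | nil => intro acc; simp
  | cons c t ih =>
    intro acc
    simp only [List.foldl_cons, List.map_cons, ih]
    unfold pvA
    split_ifs <;> simp

-- ===== VERDICT (by name: the statement is the Claim_ definition above) =====
theorem solution_spec : Claim_equal_solution := by
  intro s _
  unfold Spec_solution solution solution_alt PySem.Str.replace PySem.Str.lower
  rw [pv_foldl_A]
  have : (String.ofList (PySem.Chars.lower s.toList)).toList = PySem.Chars.lower s.toList := by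
    simp
  rw [this]
  show String.ofList (s.toList.map pvA)
      = String.ofList (PySem.Chars.replace (PySem.Chars.lower s.toList) ['a'] ['A'])
  rw [pv_replace_single]
  unfold PySem.Chars.lower
  rw [List.map_map]
  congr 1
  exact (List.map_congr_left (fun c _ => (pv_pointwise c).symm))
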